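-- pv_equiv track=rewrite | github.com/ManintheCrowds/Arc_Forge | ObsidianVault/scripts/build_index.py | categorize_sources
-- ===== SOURCE A (Python) =====
-- from collections import defaultdict
-- from typing import Dict, List, Optional, Tuple
--
-- def categorize_sources(sources: List[Dict[str, object]]) -> Dict[str, List[Dict[str, object]]]:
--     """Group sources by doc_type or default category."""
--     categories = defaultdict(list)
--
--     for source in sources:
--         doc_type = source.get("doc_type", "unverified")
--         if doc_type == "unverified" or not doc_type:
--             category = "Uncategorized"
--         else:
--             category = str(doc_type).title()
--
--         categories[category].append(source)
--
--     # Sort sources within each category by created date (newest first)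
--     for category in categories:
--         categories[category].sort(
--             key=lambda s: s.get("created", ""),
--             reverse=True
--         )
--
--     return dict(categories)
-- ===== SOURCE B (Python) =====
-- def _category(source):
--     doc_type = source.get("doc_type", "unverified")
--     if doc_type == "unverified" or not doc_type:
--         return "Uncategorized"
--     return str(doc_type).title()
--
--
-- def categorize_sources(sources):
--     """Category-major: sort the whole list once, then each bucket is a filter of it."""
--     srt = sorted(sources, key=lambda s: s.get("created", ""), reverse=True)
--     cats = []
--     for s in sources:
--         c = _category(s)
--         if c not in cats:
--             cats.append(c)
--     return {c: [s for s in srt if _category(s) == c] for c in cats}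
-- ===== Notes on version B (the rewrite author's own statement) =====
-- stated objective: alternative
-- what changed: A buckets into a dict and then sorts each bucket; B is category-major: one global stable sort, a first-appearance list of categories, and each bucket produced as a filter of the sorted list, with no dict mutation during the build.
import Mathlib
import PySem

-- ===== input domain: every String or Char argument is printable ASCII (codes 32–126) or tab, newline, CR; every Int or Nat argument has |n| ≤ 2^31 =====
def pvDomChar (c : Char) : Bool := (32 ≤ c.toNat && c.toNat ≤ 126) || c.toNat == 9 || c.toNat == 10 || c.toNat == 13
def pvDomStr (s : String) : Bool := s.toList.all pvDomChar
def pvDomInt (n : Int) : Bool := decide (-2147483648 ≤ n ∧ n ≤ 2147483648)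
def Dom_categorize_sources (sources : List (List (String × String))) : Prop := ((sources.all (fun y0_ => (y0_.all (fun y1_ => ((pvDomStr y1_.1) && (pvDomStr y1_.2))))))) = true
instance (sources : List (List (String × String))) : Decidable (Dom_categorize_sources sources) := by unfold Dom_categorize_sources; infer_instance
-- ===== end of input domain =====

-- B is category-major: one global stable sort, a first-appearance list of categories, and each
-- bucket produced as a filter of the sorted list — no dict mutation (objective: alternative).

-- str.title(), hand-ported (PySem has no title): exact on the ASCII domain, where Python's
-- cased characters are exactly the letters a-z/A-Z.
def pyTitleAux : Bool → List Char → List Char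
  | _, [] => []
  | prev, c :: rest =>
    if ('a' ≤ c ∧ c ≤ 'z') ∨ ('A' ≤ c ∧ c ≤ 'Z') then
      (if prev then (if 'A' ≤ c ∧ c ≤ 'Z' then Char.ofNat (c.toNat + 32) else c)
       else (if 'a' ≤ c ∧ c ≤ 'z' then Char.ofNat (c.toNat - 32) else c)) :: pyTitleAux true rest
    else c :: pyTitleAux false rest

def pyTitle (s : String) : String := String.ofList (pyTitleAux false s.toList)

-- ===== PORT A =====
-- doc_type = source.get("doc_type", "unverified"); category = "Uncategorized" if unverified/falsy else str(doc_type).title()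
def catOfA (s : List (String × String)) : String :=
  let doc_type := (PySem.Dict.ofList s).getD "doc_type" "unverified"
  if doc_type = "unverified" ∨ doc_type = "" then "Uncategorized" else pyTitle doc_type

def categorize_sources (sources : List (List (String × String))) : List (String × List (List (String × String))) :=
  -- categories[category].append(source)
  let categories := sources.foldl
    (fun d s => d.modify (catOfA s) [] (fun v => v ++ [s])) PySem.Dict.empty
  -- for category in categories: categories[category].sort(key=..., reverse=True); return dict(categories)
  categories.items.map
    (fun p => (p.1, PySem.List.sorted p.2 (fun s => (PySem.Dict.ofList s).getD "created" "") true))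

-- ===== PORT B =====
def catOfB (s : List (String × String)) : String :=
  let doc_type := (PySem.Dict.ofList s).getD "doc_type" "unverified"
  if doc_type = "unverified" ∨ doc_type = "" then "Uncategorized" else pyTitle doc_type

def categorize_sources_alt (sources : List (List (String × String))) : List (String × List (List (String × String))) :=
  -- srt = sorted(sources, key=lambda s: s.get("created", ""), reverse=True)
  let srt := PySem.List.sorted sources (fun s => (PySem.Dict.ofList s).getD "created" "") true
  -- cats = []; for s in sources: if _category(s) not in cats: cats.append(c)
  let cats : PySem.Set String :=
    sources.foldl (fun acc s => PySem.Set.add acc (catOfB s)) PySem.Set.empty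
  -- {c: [s for s in srt if _category(s) == c] for c in cats}  (keys are distinct)
  cats.map (fun c => (c, srt.filter (fun s => catOfB s == c)))

-- ===== PRECONDITION & SPEC =====
def Spec_categorize_sources (sources : List (List (String × String))) (out : List (String × List (List (String × String)))) : Prop := out = categorize_sources_alt sources
instance (sources : List (List (String × String))) (out : List (String × List (List (String × String)))) : Decidable (Spec_categorize_sources sources out) := by unfold Spec_categorize_sources; infer_instance

-- ===== CLAIM (what is proved, stated in full; the proofs are below) =====
def Claim_equal_categorize_sources : Prop := ∀ (sources : List (List (String × String))), Dom_categorize_sources sources → Spec_categorize_sources sources (categorize_sources sources)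

-- ===== LEMMAS AND PROOFS =====

theorem pv_insertBy_filter_neg {α : Type} (before : α → α → Bool) (p : α → Bool) (x : α)
    (l : List α) (hx : p x = false) :
    (PySem.List.insertBy before x l).filter p = l.filter p := by
  induction l with
  | nil => simp [PySem.List.insertBy, hx]
  | cons y ys ih =>
    by_cases hb : before x y = true
    · simp [PySem.List.insertBy, hb, List.filter_cons, hx]
    · simp [PySem.List.insertBy, hb, List.filter_cons, ih]

theorem pv_insertBy_cons {α : Type} (before : α → α → Bool) (x : α) (l : List α)
    (h : ∀ z ∈ l, before x z = true) :
    PySem.List.insertBy before x l = x :: l := by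
  cases l with
  | nil => simp [PySem.List.insertBy]
  | cons y ys => simp [PySem.List.insertBy, h y (by simp)]

theorem pv_filter_insertBy {α κ : Type} [LinearOrder κ] (key : α → κ) (p : α → Bool) (x : α)
    (l : List α) (hl : l.Pairwise (fun a b => key b ≤ key a)) (hx : p x = true) :
    (PySem.List.insertBy (fun a b => decide (key b < key a)) x l).filter p
      = PySem.List.insertBy (fun a b => decide (key b < key a)) x (l.filter p) := by
  induction l with
  | nil => simp [PySem.List.insertBy, hx]
  | cons y ys ih =>
    rcases List.pairwise_cons.mp hl with ⟨hy, hys⟩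
    by_cases hb : key y < key x
    · have h1 : PySem.List.insertBy (fun a b => decide (key b < key a)) x (y :: ys) = x :: y :: ys := by
        simp [PySem.List.insertBy, hb]
      rw [h1]
      have h2 : ∀ z ∈ (y :: ys).filter p, (fun a b => decide (key b < key a)) x z = true := by
        intro z hz
        have hz' : z ∈ y :: ys := List.mem_of_mem_filter hz
        have : key z ≤ key y := by
          rcases List.mem_cons.mp hz' with rfl | hmem
          · exact le_refl _
          · exact hy z hmem
        simp [lt_of_le_of_lt this hb]
      rw [pv_insertBy_cons _ _ _ h2, List.filter_cons, hx]
      simp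
    · have h1 : PySem.List.insertBy (fun a b => decide (key b < key a)) x (y :: ys)
          = y :: PySem.List.insertBy (fun a b => decide (key b < key a)) x ys := by
        simp [PySem.List.insertBy, hb]
      rw [h1, List.filter_cons, List.filter_cons]
      cases hp : p y with
      | true => simp [PySem.List.insertBy, hb, ih hys]
      | false => simp [ih hys]

-- filtering commutes with the reverse stable sort: each bucket of the sorted list is sorted
theorem pv_filter_sorted {α κ : Type} [LinearOrder κ] (key : α → κ) (p : α → Bool) (xs : List α) :
    (PySem.List.sorted xs key true).filter p = PySem.List.sorted (xs.filter p) key true := by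
  induction xs using List.reverseRecOn with
  | nil => simp [PySem.List.sorted]
  | append_singleton xs x ih =>
    rw [PySem.List.sorted_rev_eq_foldl_insertBy (xs ++ [x]), List.foldl_append,
        ← PySem.List.sorted_rev_eq_foldl_insertBy xs]
    rw [List.filter_append]
    cases hp : p x with
    | false =>
      simp only [List.foldl_cons, List.foldl_nil]
      rw [pv_insertBy_filter_neg _ _ _ _ hp, ih, List.filter_cons, hp]
      simp
    | true =>
      simp only [List.foldl_cons, List.foldl_nil]
      rw [pv_filter_insertBy key p x _ (PySem.List.sorted_pairwise_rev xs key) hp, ih]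
      rw [List.filter_cons, hp]
      simp only [if_true, List.filter_nil]
      rw [PySem.List.sorted_rev_eq_foldl_insertBy (xs.filter p ++ [x]), List.foldl_append,
          ← PySem.List.sorted_rev_eq_foldl_insertBy (xs.filter p)]
      simp

-- the append loop 'd[cat(s)].append(s)' reaches bucket c = old bucket ++ the sources of category c
theorem pv_getD_modify_fold (cat : List (String × String) → String)
    (l : List (List (String × String))) (d : PySem.Dict String (List (List (String × String))))
    (c : String) :
    (l.foldl (fun d s => d.modify (cat s) [] (fun v => v ++ [s])) d).getD c []
      = d.getD c [] ++ l.filter (fun s => cat s == c) := by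
  have h := PySem.Dict.getD_foldl_modify_append (l.map (fun s => (cat s, s))) d c
  rw [List.foldl_map] at h
  simp only at h
  rw [h, List.filter_map]
  simp [Function.comp_def]

theorem pv_items_eq_keys_map (d : PySem.Dict String (List (List (String × String))))
    (h : d.keys.Nodup) :
    d.items = d.keys.map (fun k => (k, d.getD k [])) := by
  have hk : d.keys = d.items.map (fun p => p.1) := rfl
  rw [hk, List.map_map]
  have : ∀ q ∈ d.items, ((fun k => (k, d.getD k [])) ∘ fun p => p.1) q = q := by
    intro q hq
    have : d.getD q.1 [] = q.2 := by
      have hmem : (q.1, q.2) ∈ d.items := by simpa using hq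
      exact PySem.Dict.getD_of_mem_items d hmem h []
    simp [this]
  rw [List.map_congr_left this, List.map_id']

-- ===== VERDICT (by name: the statement is the Claim_ definition above) =====
theorem categorize_sources_spec : Claim_equal_categorize_sources := by
  intro sources _
  unfold Spec_categorize_sources categorize_sources categorize_sources_alt
  have hcat : catOfB = catOfA := rfl
  rw [hcat]
  set cat := catOfA
  set key : List (String × String) → String := fun s => (PySem.Dict.ofList s).getD "created" "" with hkey
  -- A side: dict of buckets, keys in first-appearance order
  set dA := sources.foldl (fun d s => d.modify (cat s) [] (fun v => v ++ [s])) PySem.Dict.empty with hdA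
  have hAkeys : dA.keys = PySem.Set.ofList (sources.map cat) := by
    rw [hdA, PySem.Dict.keys_foldl_modify_key sources cat [] (fun d s v => v ++ [s])]
    simp [PySem.Set.update_nil_left, PySem.Dict.keys_empty]
  have hAnodup : dA.keys.Nodup := by rw [hAkeys]; exact PySem.Set.nodup_ofList _
  have hAgetD : ∀ c, dA.getD c [] = sources.filter (fun s => cat s == c) := by
    intro c; rw [hdA, pv_getD_modify_fold]; simp [PySem.Dict.getD_empty]
  -- B side: cats is exactly the first-appearance list of categories
  have hcats : sources.foldl (fun acc s => PySem.Set.add acc (cat s)) PySem.Set.empty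
      = PySem.Set.ofList (sources.map cat) := by
    rw [PySem.Set.ofList_eq_foldl, List.foldl_map]; rfl
  rw [hcats]
  -- assemble: both sides are maps over the same key list
  show List.map (fun p => (p.1, PySem.List.sorted p.2 key true)) dA.items
      = (PySem.Set.ofList (sources.map cat)).map
          (fun c => (c, (PySem.List.sorted sources key true).filter (fun s => cat s == c)))
  rw [pv_items_eq_keys_map dA hAnodup, List.map_map, hAkeys]
  apply List.map_congr_left
  intro c _
  simp only [Function.comp_def]
  rw [hAgetD c, pv_filter_sorted]
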